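-- pv_equiv track=rewrite | github.com/bobrenjc93/tlhub | src/tlhub/trace_parser.py | build_string_table_list
-- ===== SOURCE A (Python) =====
-- def build_string_table_list(string_table: dict[int, str]) -> list[str | None]:
--     if not string_table:
--         return []
--     max_index = max(string_table)
--     table: list[str | None] = [None] * (max_index + 1)
--     for index, value in string_table.items():
--         if index >= 0:
--             table[index] = value
--     return table
-- ===== SOURCE B (Python) =====
-- def build_string_table_list(string_table: dict[int, str]) -> list[str | None]:
--     if not string_table:
--         return []
--     max_index = max(string_table)
--     return [string_table.get(index) for index in range(max_index + 1)]
-- ===== Notes on version B (the rewrite author's own statement) =====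
-- stated objective: idiomatic
-- what changed: B is a gather instead of a scatter: it iterates over the destination positions 0..max_index and looks each one up in the dict, instead of pre-allocating a None list and writing dict items into it.
import Mathlib
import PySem

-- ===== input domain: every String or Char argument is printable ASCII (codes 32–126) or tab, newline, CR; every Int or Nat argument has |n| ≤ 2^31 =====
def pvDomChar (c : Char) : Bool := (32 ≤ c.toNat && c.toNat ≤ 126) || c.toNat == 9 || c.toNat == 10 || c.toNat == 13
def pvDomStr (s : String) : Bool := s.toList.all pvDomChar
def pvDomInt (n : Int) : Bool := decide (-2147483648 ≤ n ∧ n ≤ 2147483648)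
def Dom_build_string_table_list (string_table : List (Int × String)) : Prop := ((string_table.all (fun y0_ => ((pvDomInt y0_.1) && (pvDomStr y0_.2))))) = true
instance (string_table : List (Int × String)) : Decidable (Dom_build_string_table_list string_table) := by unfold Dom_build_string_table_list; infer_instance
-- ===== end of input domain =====

-- B is a gather (map positions 0..max over a dict lookup) instead of A's scatter into a pre-allocated list; idiomatic, not faster.


-- ===== PORT A =====
-- A: [None] * (max_index + 1) then scatter: table[index] = value for each non-negative key.
def build_string_table_list (string_table : List (Int × String)) : List (Option String) :=
  if string_table.isEmpty then []
  else
    match PySem.List.max? (string_table.map (·.1)) id with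
    | none => []
    | some max_index =>
      let table : List (Option String) := List.replicate (max_index + 1).toNat none
      string_table.foldl
        (fun t kv => if kv.1 ≥ 0 then PySem.List.pySetD t kv.1 (some kv.2) else t) table

-- ===== PORT B =====
-- dict.get on the association list (keys are unique under Pre_)
def pyDictGet (string_table : List (Int × String)) (i : Int) : Option String :=
  (string_table.find? (fun kv => kv.1 == i)).map (·.2)

def build_string_table_list_alt (string_table : List (Int × String)) : List (Option String) :=
  if string_table.isEmpty then []
  else
    match PySem.List.max? (string_table.map (·.1)) id with
    | none => []
    | some max_index =>
      (PySem.List.pyRange 0 (max_index + 1) 1).map (fun i => pyDictGet string_table i)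

-- ===== PRECONDITION & SPEC =====
-- Pre_ only requires distinct keys: the argument is a Python dict, whose item list can never repeat a key.
def Pre_build_string_table_list (string_table : List (Int × String)) : Prop :=
  (string_table.map (·.1)).Nodup
instance (string_table : List (Int × String)) : Decidable (Pre_build_string_table_list string_table) := by unfold Pre_build_string_table_list; infer_instance

def pvWitness_build_string_table_list : (List (Int × String)) := [(0, "a"), (2, "b"), (-1, "c")]

def Spec_build_string_table_list (string_table : List (Int × String)) (out : List (Option String)) : Prop := out = build_string_table_list_alt string_table
instance (string_table : List (Int × String)) (out : List (Option String)) : Decidable (Spec_build_string_table_list string_table out) := by unfold Spec_build_string_table_list; infer_instance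

-- ===== CLAIM (what is proved, stated in full; the proofs are below) =====
def Claim_equal_build_string_table_list : Prop := ∀ (string_table : List (Int × String)), Dom_build_string_table_list string_table → Pre_build_string_table_list string_table → Spec_build_string_table_list string_table (build_string_table_list string_table)

-- ===== LEMMAS AND PROOFS =====

-- what A's scatter fold holds at a position: the (unique) entry with that key, else the old content
lemma scatter_get (st : List (Int × String)) (t : List (Option String)) (j : Nat)
    (hnd : (st.map (·.1)).Nodup) :
    (st.foldl (fun t kv => if kv.1 ≥ 0 then PySem.List.pySetD t kv.1 (some kv.2) else t) t)[j]?
      = match st.find? (fun kv => kv.1 == (j : Int)) with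
        | some kv => if j < t.length then some (some kv.2) else t[j]?
        | none => t[j]? := by
  induction st generalizing t with
  | nil => rfl
  | cons kv rest ih =>
    simp only [List.map_cons, List.nodup_cons] at hnd
    obtain ⟨hk, hnd'⟩ := hnd
    simp only [List.foldl_cons, List.find?_cons]
    by_cases hkey : kv.1 = (j : Int)
    · have hge : kv.1 ≥ 0 := by omega
      simp only [hkey, beq_self_eq_true]
      have hrest : rest.find? (fun kv => kv.1 == (j : Int)) = none := by
        rw [List.find?_eq_none]
        intro x hx hbx
        exact hk (by
          have : x.1 = (j : Int) := by simpa using hbx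
          rw [← hkey] at this
          exact (this ▸ (List.mem_map.mpr ⟨x, hx, rfl⟩ : x.1 ∈ rest.map (·.1))))
      rw [ih _ hnd', hrest]
      simp only [ge_iff_le, Int.natCast_nonneg, if_true, PySem.List.pySetD_natCast]
      by_cases hj : j < t.length
      · simp [hj]
      · simp [hj]
    · have hne : (kv.1 == (j : Int)) = false := by simpa using hkey
      simp only [hne]
      have hsame : ∀ t' : List (Option String),
          (if kv.1 ≥ 0 then PySem.List.pySetD t' kv.1 (some kv.2) else t').length = t'.length ∧
          (if kv.1 ≥ 0 then PySem.List.pySetD t' kv.1 (some kv.2) else t')[j]? = t'[j]? := by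
        intro t'
        split
        · constructor
          · rw [PySem.List.length_pySetD]
          · rw [PySem.List.pySetD_of_nonneg t' (some kv.2) (by omega)]
            rw [List.getElem?_set]
            have : kv.1.toNat ≠ j := by omega
            simp [this]
        · exact ⟨rfl, rfl⟩
      rw [ih _ hnd', (hsame t).1, (hsame t).2]

theorem build_string_table_list_spec : Claim_equal_build_string_table_list := by
  intro st _hdom hpre
  unfold Spec_build_string_table_list build_string_table_list build_string_table_list_alt
  by_cases hemp : st.isEmpty
  · simp [hemp]
  · simp only [hemp, if_neg, Bool.false_eq_true, not_false_eq_true]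
    cases hmax : PySem.List.max? (st.map (·.1)) id with
    | none => rfl
    | some m =>
      apply List.ext_getElem?
      intro j
      rw [scatter_get st _ j hpre]
      dsimp only
      have hlen : (List.replicate (m + 1).toNat (none : Option String)).length = (m + 1).toNat := by
        simp
      rw [PySem.List.pyRange_one]
      simp only [zero_add, List.map_map, Int.sub_zero]
      by_cases hj : j < (m + 1).toNat
      · rw [List.getElem?_map, List.getElem?_range hj]
        simp only [Option.map_some, Function.comp]
        cases hf : st.find? (fun kv => kv.1 == (j : Int)) with
        | some kv => simp [hlen, hj, pyDictGet, hf]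
        | none => simp [hlen, hj, pyDictGet, hf]
      · rw [List.getElem?_map]
        rw [List.getElem?_eq_none (by simpa using Nat.le_of_not_lt hj)]
        cases hf : st.find? (fun kv => kv.1 == (j : Int)) with
        | some kv =>
          -- impossible: key j would exceed the maximum m
          exfalso
          have hmem : kv ∈ st := List.mem_of_find?_eq_some hf
          have hkj : kv.1 = (j : Int) := by simpa using List.find?_some hf
          have hle : kv.1 ≤ m :=
            PySem.List.max?_isMax hmax kv.1 (List.mem_map.mpr ⟨kv, hmem, rfl⟩)
          omega
        | none =>
          rw [List.getElem?_eq_none (show (List.range (m + 1).toNat).length ≤ j by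
            simpa using Nat.le_of_not_lt hj)]
          rfl
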